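-- pv_equiv track=rewrite | github.com/hobstowler/AI-ML-Crypto-Trading-Bot | export_candlestick_data.py | user_needs_help
-- ===== SOURCE A (Python) =====
-- def user_needs_help(arguments, options_dict: dict):
--     valid_options = ["-h", "--help"]
--     if len(arguments) < 4:
--         return True
--     if len(arguments) > 4:
--         return True
--     option_keys = options_dict.keys()
--     if "-h" in option_keys:
--         return True
--     if "--help" in option_keys:
--         return True
--     for option in option_keys:
--         if option not in valid_options:
--             return True
--     return False
-- ===== SOURCE B (Python) =====
-- def user_needs_help(arguments, options_dict: dict):
--     # Any option key triggers help: '-h'/'--help' explicitly, anything else via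
--     # the not-in-valid_options loop. So help is needed iff the argument count
--     # is not exactly 4 or any option was passed.
--     return len(arguments) != 4 or len(options_dict) != 0
-- ===== Notes on version B (the rewrite author's own statement) =====
-- stated objective: simpler
-- what changed: Replaced the branch chain and loop over option keys by a single closed-form boolean: every key in options_dict is either '-h'/'--help' (caught by the guards) or not a valid option (caught by the loop), so A is equivalent to len(arguments) != 4 or options_dict being non-empty.
import Mathlib
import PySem

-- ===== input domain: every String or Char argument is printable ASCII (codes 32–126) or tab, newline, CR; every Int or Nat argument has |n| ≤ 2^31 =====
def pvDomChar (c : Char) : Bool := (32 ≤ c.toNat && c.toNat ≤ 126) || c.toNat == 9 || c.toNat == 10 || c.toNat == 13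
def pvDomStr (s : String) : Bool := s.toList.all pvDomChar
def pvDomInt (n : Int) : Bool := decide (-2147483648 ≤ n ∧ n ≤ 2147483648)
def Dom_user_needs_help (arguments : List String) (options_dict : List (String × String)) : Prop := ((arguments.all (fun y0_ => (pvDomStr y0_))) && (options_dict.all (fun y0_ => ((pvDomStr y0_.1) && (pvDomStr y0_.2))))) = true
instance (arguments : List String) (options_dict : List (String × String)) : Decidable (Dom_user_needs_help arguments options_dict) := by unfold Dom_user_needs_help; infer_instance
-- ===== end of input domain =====

-- B replaces A's branch chain and key loop by the equivalent closed-form test 'len(arguments) != 4 or options_dict non-empty' (objective: simpler).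


-- ===== PORT A =====
-- A, transliterated: length guards, '-h'/'--help' membership checks, then a loop over the keys.
def pvLoopA (valid_options : List String) : List String → Bool
  | [] => false
  | option :: rest => if option ∉ valid_options then true else pvLoopA valid_options rest

def user_needs_help (arguments : List String) (options_dict : List (String × String)) : Bool :=
  let valid_options := ["-h", "--help"]
  if arguments.length < 4 then true
  else if arguments.length > 4 then true
  else
    let option_keys := options_dict.map Prod.fst
    if "-h" ∈ option_keys then true
    else if "--help" ∈ option_keys then true
    else pvLoopA valid_options option_keys

-- ===== PORT B =====
-- B: closed-form — help is needed iff argc ≠ 4 or any option was passed.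
def user_needs_help_alt (arguments : List String) (options_dict : List (String × String)) : Bool :=
  arguments.length != 4 || options_dict.length != 0

-- ===== PRECONDITION & SPEC =====
def Spec_user_needs_help (arguments : List String) (options_dict : List (String × String)) (out : Bool) : Prop := out = user_needs_help_alt arguments options_dict
instance (arguments : List String) (options_dict : List (String × String)) (out : Bool) : Decidable (Spec_user_needs_help arguments options_dict out) := by unfold Spec_user_needs_help; infer_instance

-- ===== CLAIM (what is proved, stated in full; the proofs are below) =====
def Claim_equal_user_needs_help : Prop := ∀ (arguments : List String) (options_dict : List (String × String)), Dom_user_needs_help arguments options_dict → Spec_user_needs_help arguments options_dict (user_needs_help arguments options_dict)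

-- ===== LEMMAS AND PROOFS =====

-- ===== VERDICT (by name: the statement is the Claim_ definition above) =====
theorem pvLoopA_nonempty (k : String) (ks : List String) :
    pvLoopA ["-h", "--help"] (k :: ks) = true ∨ k = "-h" ∨ k = "--help" := by
  by_cases h : k = "-h" ∨ k = "--help"
  · right; exact h
  · left; simp [pvLoopA]; tauto

theorem user_needs_help_spec : Claim_equal_user_needs_help := by
  intro arguments options_dict _
  unfold Spec_user_needs_help user_needs_help user_needs_help_alt
  cases hk : options_dict.map Prod.fst with
  | nil =>
      have hd : options_dict = [] := by
        cases options_dict with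
        | nil => rfl
        | cons p t => simp at hk
      subst hd
      split_ifs with h1 h2 <;> simp [pvLoopA] <;> omega
  | cons k ks =>
      have hd : options_dict ≠ [] := by
        intro h; subst h; simp at hk
      have hne : options_dict.length != 0 := by
        simp [List.length_eq_zero_iff]; exact hd
      simp only [hne, Bool.or_true]
      split_ifs with h1 h2 h3 h4 <;> simp_all
      rcases pvLoopA_nonempty k ks with h | h | h <;> simp_all
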